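-- pv_equiv track=rewrite | github.com/PeterDziuba/Codeguild | web_tug.py | blank_space_remover
-- ===== SOURCE A (Python) =====
-- def blank_space_remover(list):
-- 	blank_list = []
-- 	for i in list:
-- 		while "  " in i:
-- 			i = i.replace("  ", " ")
-- 		i = i.replace(" ", ",")
-- 		blank_list.append(i)
-- 	return blank_list
-- ===== SOURCE B (Python) =====
-- def blank_space_remover(list):
--     out = []
--     for s in list:
--         buf = []
--         prev = False
--         for ch in s:
--             if ch == ' ':
--                 if not prev:
--                     buf.append(',')
--                 prev = True
--             else:
--                 buf.append(ch)
--                 prev = False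
--         out.append(''.join(buf))
--     return out
-- ===== Notes on version B (the rewrite author's own statement) =====
-- stated objective: alternative
-- what changed: Replaces A's repeated whole-string '.replace(" ", " ")' passes (looped until no double space remains) plus a final '.replace(" ", ",")' with a single left-to-right scan per string that keeps a prev-space flag and emits one comma at the start of each space run.
import Mathlib
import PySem

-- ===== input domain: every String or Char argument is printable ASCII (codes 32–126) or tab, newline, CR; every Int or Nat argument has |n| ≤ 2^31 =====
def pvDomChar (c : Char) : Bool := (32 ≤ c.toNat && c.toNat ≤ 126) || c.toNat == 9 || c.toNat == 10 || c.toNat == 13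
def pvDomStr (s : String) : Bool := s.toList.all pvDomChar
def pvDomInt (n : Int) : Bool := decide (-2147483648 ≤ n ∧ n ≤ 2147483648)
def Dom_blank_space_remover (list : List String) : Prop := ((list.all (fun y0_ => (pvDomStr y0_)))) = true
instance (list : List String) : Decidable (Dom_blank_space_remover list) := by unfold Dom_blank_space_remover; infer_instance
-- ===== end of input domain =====

-- B replaces A's repeated global '.replace("  ", " ")' passes with a single stateful
-- left-to-right scan per string (append ',' only at the start of each space run).


-- ===== PORT A =====
-- termination facts for A's 'while "  " in i' loop (cited by pvWhile's decreasing_by)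
theorem pv_go_len_le (fuel : Nat) (l acc : List Char) :
    (PySem.Chars.replace.go [' ', ' '] [' '] fuel l acc).length ≤ acc.length + l.length := by
  induction fuel generalizing l acc with
  | zero => simp [PySem.Chars.replace.go]
  | succ fuel ih =>
    cases l with
    | nil => simp [PySem.Chars.replace.go]
    | cons c t =>
      simp only [PySem.Chars.replace.go]
      split
      · rename_i hpre
        rcases t with _ | ⟨c2, t2⟩
        · simp [List.isPrefixOf] at hpre
        · have := ih t2 ([' '] ++ acc)
          simp at this ⊢
          omega
      · have := ih t (c :: acc)
        simp at this ⊢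
        omega

theorem pv_go_len_lt (fuel : Nat) (l acc : List Char)
    (hin : [' ', ' '] <:+: l) (hf : l.length ≤ fuel) :
    (PySem.Chars.replace.go [' ', ' '] [' '] fuel l acc).length < acc.length + l.length := by
  induction fuel generalizing l acc with
  | zero =>
    rcases l with _ | ⟨c, t⟩
    · simp at hin
    · simp at hf
  | succ fuel ih =>
    cases l with
    | nil => simp at hin
    | cons c t =>
      simp only [PySem.Chars.replace.go]
      split
      · rename_i hpre
        rcases t with _ | ⟨c2, t2⟩
        · simp [List.isPrefixOf] at hpre
        · have := pv_go_len_le fuel t2 ([' '] ++ acc)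
          simp at this ⊢
          omega
      · rename_i hpre
        have hin' : [' ', ' '] <:+: t := by
          rcases List.infix_cons_iff.mp hin with h | h
          · exact absurd (List.isPrefixOf_iff_prefix.mpr h) (by simpa using hpre)
          · exact h
        have := ih t (c :: acc) hin' (by simp at hf ⊢; omega)
        simp at this ⊢
        omega

theorem pv_replace_len_lt (i : String) (h : PySem.Str.isIn "  " i = true) :
    (PySem.Str.replace i "  " " ").toList.length < i.toList.length := by
  have hin : "  ".toList <:+: i.toList := (PySem.Str.isIn_iff_infix _ _).mp h
  simp only [PySem.Str.toList_replace, PySem.Chars.replace]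
  have he : ("  ".toList.isEmpty) = false := by decide
  rw [he]
  simpa using pv_go_len_lt i.toList.length i.toList [] (by simpa using hin) le_rfl

-- A's inner while loop: i = i.replace("  ", " ") until "  " not in i
def pvWhile (i : String) : String :=
  if PySem.Str.isIn "  " i then pvWhile (PySem.Str.replace i "  " " ") else i
termination_by i.toList.length
decreasing_by exact pv_replace_len_lt i (by assumption)

def blank_space_remover (list : List String) : List String :=
  list.foldl (fun blank_list i =>
    blank_list ++ [PySem.Str.replace (pvWhile i) " " ","]) []

-- ===== PORT B =====
-- Source B's inner character loop: buffer + prev-space flag ('.join(buf)' ported as String.ofList)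
def pvScan (s : List Char) : List Char × Bool :=
  s.foldl (fun st ch =>
    if ch = ' ' then
      (if st.2 = false then (st.1 ++ [','], true) else (st.1, true))
    else (st.1 ++ [ch], false)) ([], false)

def blank_space_remover_alt (list : List String) : List String :=
  list.foldl (fun out s => out ++ [String.ofList (pvScan s.toList).1]) []

-- ===== PRECONDITION & SPEC =====
def Spec_blank_space_remover (list : List String) (out : List String) : Prop := out = blank_space_remover_alt list
instance (list : List String) (out : List String) : Decidable (Spec_blank_space_remover list out) := by unfold Spec_blank_space_remover; infer_instance

-- ===== CLAIM (what is proved, stated in full; the proofs are below) =====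
def Claim_equal_blank_space_remover : Prop := ∀ (list : List String), Dom_blank_space_remover list → Spec_blank_space_remover list (blank_space_remover list)

-- ===== LEMMAS AND PROOFS =====
-- specification function: collapse runs of ' ' to one ' ' (b = "previous char was a space")
def pvCsp : List Char → Bool → List Char
  | [], _ => []
  | c :: t, b => if c = ' ' then (if b then pvCsp t true else ' ' :: pvCsp t true) else c :: pvCsp t false

def pvSp2c (c : Char) : Char := if c = ' ' then ',' else c

theorem pvCsp_space (l : List Char) (b : Bool) :
    pvCsp (' ' :: l) b = if b then pvCsp l true else ' ' :: pvCsp l true := by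
  simp [pvCsp]

theorem pvCsp_other {c : Char} (hc : c ≠ ' ') (l : List Char) (b : Bool) :
    pvCsp (c :: l) b = c :: pvCsp l false := by
  simp [pvCsp, hc]

theorem pv_go_nil (old new : List Char) (fuel : Nat) (acc : List Char) :
    PySem.Chars.replace.go old new fuel [] acc = acc.reverse := by
  cases fuel <;> simp [PySem.Chars.replace.go]

-- replace.go factors out its accumulator
theorem pv_go_acc (old new : List Char) (fuel : Nat) (l acc : List Char) :
    PySem.Chars.replace.go old new fuel l acc = acc.reverse ++ PySem.Chars.replace.go old new fuel l [] := by
  induction fuel generalizing l acc with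
  | zero => simp [PySem.Chars.replace.go]
  | succ fuel ih =>
    cases l with
    | nil => simp [PySem.Chars.replace.go]
    | cons c t =>
      simp only [PySem.Chars.replace.go]
      split
      · rw [ih _ (new.reverse ++ acc), ih _ (new.reverse ++ [])]
        simp
      · rw [ih _ (c :: acc), ih _ [c]]
        simp

-- one replace("  ", " ") pass preserves the collapsed form
theorem pv_csp_go (fuel : Nat) (l : List Char) (b : Bool) (hf : l.length ≤ fuel) :
    pvCsp (PySem.Chars.replace.go [' ', ' '] [' '] fuel l []) b = pvCsp l b := by
  induction fuel generalizing l b with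
  | zero =>
    rcases l with _ | ⟨c, t⟩
    · rfl
    · simp at hf
  | succ fuel ih =>
    cases l with
    | nil => simp [PySem.Chars.replace.go]
    | cons c t =>
      simp only [PySem.Chars.replace.go]
      split
      · rename_i hpre
        rcases t with _ | ⟨c2, t2⟩
        · simp [List.isPrefixOf] at hpre
        · have hc : ' ' = c ∧ ' ' = c2 := by simpa [List.isPrefixOf] using hpre
          obtain ⟨hc1, hc2⟩ := hc
          subst hc1; subst hc2
          have ht2 : t2.length ≤ fuel := by simp at hf; omega
          show pvCsp (PySem.Chars.replace.go [' ', ' '] [' '] fuel t2 [' ']) b = _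
          rw [pv_go_acc]
          show pvCsp (' ' :: PySem.Chars.replace.go [' ', ' '] [' '] fuel t2 []) b = _
          rw [pvCsp_space, pvCsp_space, pvCsp_space, ih t2 true ht2]
          cases b <;> rfl
      · rename_i hpre
        have ht : t.length ≤ fuel := by simp at hf; omega
        rw [pv_go_acc]
        by_cases hc : c = ' '
        · subst hc
          rcases t with _ | ⟨c2, t2⟩
          · simp [pv_go_nil]
          · have hc2 : c2 ≠ ' ' := by
              intro h; subst h; simp [List.isPrefixOf] at hpre
            show pvCsp (' ' :: PySem.Chars.replace.go [' ', ' '] [' '] fuel (c2 :: t2) []) b = _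
            rw [pvCsp_space, pvCsp_space, ih (c2 :: t2) true ht]
        · show pvCsp (c :: PySem.Chars.replace.go [' ', ' '] [' '] fuel t []) b = _
          rw [pvCsp_other hc, pvCsp_other hc, ih t false ht]

theorem pv_csp_replace (s : List Char) (b : Bool) :
    pvCsp (PySem.Chars.replace s [' ', ' '] [' ']) b = pvCsp s b := by
  simp only [PySem.Chars.replace]
  have he : (([' ', ' '] : List Char).isEmpty) = false := by decide
  rw [he]
  simpa using pv_csp_go s.length s b le_rfl

-- a string with no "  " and (if b) no leading space is already collapsed
theorem pv_csp_fix (l : List Char) (b : Bool) (hin : ¬ ([' ', ' '] <:+: l))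
    (hb : b = true → l.head? ≠ some ' ') : pvCsp l b = l := by
  induction l generalizing b with
  | nil => rfl
  | cons c t ih =>
    have hin' : ¬ ([' ', ' '] <:+: t) := fun h => hin (h.trans (List.suffix_cons _ _).isInfix)
    by_cases hc : c = ' '
    · subst hc
      have hb' : b = false := by
        cases b
        · rfl
        · exact absurd rfl (hb rfl)
      subst hb'
      have hhd : t.head? ≠ some ' ' := by
        intro h
        rcases t with _ | ⟨c2, t2⟩
        · simp at h
        · have hc2 : c2 = ' ' := by simpa using h
          subst hc2
          exact hin ⟨[], t2, by simp⟩
      rw [pvCsp_space]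
      simp only [Bool.false_eq_true, if_false]
      rw [ih true hin' (fun _ => hhd)]
    · rw [pvCsp_other hc, ih false hin' (by simp)]

-- the while loop computes the collapsed string
theorem pv_while_toList (i : String) : (pvWhile i).toList = pvCsp i.toList false := by
  induction hn : i.toList.length using Nat.strong_induction_on generalizing i with
  | _ n ih =>
    rw [pvWhile]
    split
    · rename_i h
      have hlt := pv_replace_len_lt i h
      rw [ih _ (by omega) _ rfl]
      rw [PySem.Str.toList_replace]
      have h1 : ("  ".toList) = [' ', ' '] := by decide
      have h2 : (" ".toList) = [' '] := by decide
      rw [h1, h2, pv_csp_replace]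
    · rename_i h
      have hin : ¬ ([' ', ' '] <:+: i.toList) := by
        intro hc
        exact h ((PySem.Str.isIn_iff_infix _ _).mpr (by simpa using hc))
      exact (pv_csp_fix i.toList false hin (by simp)).symm

-- single-char replace(" ", ",") is a character map
theorem pv_go_map (fuel : Nat) (l acc : List Char) (hf : l.length ≤ fuel) :
    PySem.Chars.replace.go [' '] [','] fuel l acc = acc.reverse ++ l.map pvSp2c := by
  induction fuel generalizing l acc with
  | zero =>
    rcases l with _ | ⟨c, t⟩
    · simp [PySem.Chars.replace.go]
    · simp at hf
  | succ fuel ih =>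
    cases l with
    | nil => simp [PySem.Chars.replace.go]
    | cons c t =>
      have ht : t.length ≤ fuel := by simp at hf; omega
      simp only [PySem.Chars.replace.go]
      split
      · rename_i hpre
        have hc : ' ' = c := by simpa [List.isPrefixOf] using hpre
        subst hc
        show PySem.Chars.replace.go [' '] [','] fuel t (',' :: acc) = _
        rw [ih t _ ht]
        simp [pvSp2c]
      · rename_i hpre
        have hc : c ≠ ' ' := by
          intro h; subst h; simp [List.isPrefixOf] at hpre
        rw [ih t _ ht]
        simp [pvSp2c, hc]

theorem pv_replace_comma (s : List Char) :
    PySem.Chars.replace s [' '] [','] = s.map pvSp2c := by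
  simp only [PySem.Chars.replace]
  have he : (([' '] : List Char).isEmpty) = false := by decide
  rw [he]
  simpa using pv_go_map s.length s [] le_rfl

-- B's scan computes the comma-mapped collapse
theorem pv_scan_general (l buf : List Char) (b : Bool) :
    (l.foldl (fun st ch =>
      if ch = ' ' then
        (if st.2 = false then (st.1 ++ [','], true) else (st.1, true))
      else (st.1 ++ [ch], false)) (buf, b)).1 = buf ++ (pvCsp l b).map pvSp2c := by
  induction l generalizing buf b with
  | nil => simp [pvCsp]
  | cons c t ih =>
    simp only [List.foldl_cons]
    by_cases hc : c = ' '
    · subst hc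
      rw [if_pos rfl]
      cases b
      · rw [if_pos rfl, ih (buf ++ [',']) true, pvCsp_space]
        simp [pvSp2c]
      · rw [if_neg (by simp), ih buf true, pvCsp_space]
        simp
    · rw [if_neg hc, ih (buf ++ [c]) false, pvCsp_other hc]
      simp [pvSp2c, hc]

-- per-element equality of the two ports
theorem pv_elem_eq (i : String) :
    PySem.Str.replace (pvWhile i) " " "," = String.ofList (pvScan i.toList).1 := by
  have h1 : (PySem.Str.replace (pvWhile i) " " ",").toList
      = (pvCsp i.toList false).map pvSp2c := by
    rw [PySem.Str.toList_replace]
    have hs : (" ".toList) = [' '] := by decide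
    have hc : (",".toList) = [','] := by decide
    rw [hs, hc, pv_replace_comma, pv_while_toList]
  have h2 : (pvScan i.toList).1 = (pvCsp i.toList false).map pvSp2c := by
    simpa [pvScan] using pv_scan_general i.toList [] false
  rw [h2, ← h1, String.ofList_toList]

-- ===== VERDICT (by name: the statement is the Claim_ definition above) =====
theorem blank_space_remover_spec : Claim_equal_blank_space_remover := by
  intro list _
  unfold Spec_blank_space_remover blank_space_remover blank_space_remover_alt
  rw [PySem.List.foldl_append_singleton_eq_map, PySem.List.foldl_append_singleton_eq_map]
  exact List.map_congr_left (fun i _ => pv_elem_eq i)
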